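-- pv_equiv track=rewrite | github.com/theja-mitta/pythonProject | bucket_reader.py | search
-- ===== SOURCE A (Python) =====
-- def search(name, row):
--     nested_list = []
--     for item in row:
--         if isinstance(item, str):
--             item = item.split(', ')
--             nested_list.append(item)
--     # Using list comprehension to convert a list of lists to a flat list
--     flat_list = [item for elem in nested_list for item in elem]
--     if name in flat_list:
--         return True
-- ===== SOURCE B (Python) =====
-- def search(name, row):
--     # single early-exit pass: split each string item and test membership directly
--     for item in row:
--         if isinstance(item, str) and name in item.split(', '):
--             return True
--     return None
-- ===== Notes on version B (the rewrite author's own statement) =====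
-- stated objective: idiomatic
-- what changed: Replaces the three-phase build-nested-list / flatten / membership-test with a single early-exit loop that splits each item and returns True on the first match, building no intermediate lists.
import Mathlib
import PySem

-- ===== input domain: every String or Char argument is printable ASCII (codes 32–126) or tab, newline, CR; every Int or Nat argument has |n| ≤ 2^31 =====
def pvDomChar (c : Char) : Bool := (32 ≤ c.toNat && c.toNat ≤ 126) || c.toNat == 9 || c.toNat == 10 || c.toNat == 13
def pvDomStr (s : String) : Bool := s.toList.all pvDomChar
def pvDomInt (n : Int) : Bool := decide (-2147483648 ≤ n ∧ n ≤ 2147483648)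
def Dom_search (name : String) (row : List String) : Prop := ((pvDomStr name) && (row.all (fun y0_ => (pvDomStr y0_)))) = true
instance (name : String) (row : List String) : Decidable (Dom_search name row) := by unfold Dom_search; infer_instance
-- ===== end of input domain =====

-- B changes only the decomposition (one early-exit pass instead of build/flatten/test); return value only, no mutation.
-- primitive wrapper: item.split(', ') (sep non-empty, so split? is some)
def pySplitComma (s : String) : List String := (PySem.Str.split? s ", ").getD []

-- ===== PORT A =====
-- A: build nested_list (each str item split on ', '), flatten it, then test membership.
def search (name : String) (row : List String) : Option Bool :=
  let nested_list := row.foldl (fun acc item => acc ++ [pySplitComma item]) []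
  let flat_list := nested_list.foldl (fun acc elem => acc ++ elem) []
  if name ∈ flat_list then some true else none

-- ===== PORT B =====
-- B: single early-exit loop over row.
def searchAltLoop (name : String) : List String → Option Bool
  | [] => none
  | item :: rest =>
    if name ∈ pySplitComma item then some true else searchAltLoop name rest

def search_alt (name : String) (row : List String) : Option Bool :=
  searchAltLoop name row

-- ===== PRECONDITION & SPEC =====
def Spec_search (name : String) (row : List String) (out : Option Bool) : Prop := out = search_alt name row
instance (name : String) (row : List String) (out : Option Bool) : Decidable (Spec_search name row out) := by unfold Spec_search; infer_instance

-- ===== CLAIM (what is proved, stated in full; the proofs are below) =====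
def Claim_equal_search : Prop := ∀ (name : String) (row : List String), Dom_search name row → Spec_search name row (search name row)

-- ===== LEMMAS AND PROOFS =====
theorem flat_foldl_mem (name : String) (l : List (List String)) (acc : List String) :
    (name ∈ l.foldl (fun acc elem => acc ++ elem) acc) ↔ name ∈ acc ∨ ∃ e ∈ l, name ∈ e := by
  induction l generalizing acc with
  | nil => simp
  | cons h t ih => simp [List.foldl, ih]; tauto

theorem nested_foldl_eq (row : List String) (acc : List (List String)) :
    row.foldl (fun acc item => acc ++ [pySplitComma item]) acc
      = acc ++ row.map (fun item => pySplitComma item) := by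
  induction row generalizing acc with
  | nil => simp
  | cons h t ih => simp [List.foldl, ih]

theorem loop_char (name : String) (row : List String) :
    searchAltLoop name row = if ∃ e ∈ row, name ∈ pySplitComma e then some true else none := by
  induction row with
  | nil => simp [searchAltLoop]
  | cons h t ih =>
    by_cases hm : name ∈ pySplitComma h <;> simp [searchAltLoop, hm, ih] <;> split_ifs <;> tauto

-- ===== VERDICT (by name: the statement is the Claim_ definition above) =====
theorem search_spec : Claim_equal_search := by
  intro name row _
  unfold Spec_search search search_alt
  simp only [nested_foldl_eq, List.nil_append, loop_char]
  have h2 : (name ∈ (row.map (fun item => pySplitComma item)).foldl (fun acc elem => acc ++ elem) []) ↔ (∃ e ∈ row, name ∈ pySplitComma e) := by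
    rw [flat_foldl_mem]; simp
  rw [if_congr h2 rfl rfl]
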